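-- pv_equiv track=rewrite | github.com/Alperemrehas/web-search-engine-design | main.py | compute_document_based_cost
-- ===== SOURCE A (Python) =====
-- def compute_document_based_cost(queries, partitioned_terms):
--     costs = 0
--
--     for query in queries:
--         query_terms = query.split()
--         query_cost = 0
--
--         for term in query_terms:
--             if term in partitioned_terms:
--                 query_cost += partitioned_terms[term]
--
--         costs += query_cost
--
--     return costs
-- ===== SOURCE B (Python) =====
-- def compute_document_based_cost(queries, partitioned_terms):
--     # One aggregated frequency table over all query terms, then a single
--     # pass over the distinct terms.
--     freq = {}
--     for query in queries:
--         for term in query.split():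
--             freq[term] = freq.get(term, 0) + 1
--     total = 0
--     for term, count in freq.items():
--         if term in partitioned_terms:
--             total += count * partitioned_terms[term]
--     return total
-- ===== Notes on version B (the rewrite author's own statement) =====
-- stated objective: alternative
-- what changed: B replaces the per-occurrence accumulation over each query with one aggregated frequency table of all terms and a second pass over the distinct terms summing count * cost.
import Mathlib
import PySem

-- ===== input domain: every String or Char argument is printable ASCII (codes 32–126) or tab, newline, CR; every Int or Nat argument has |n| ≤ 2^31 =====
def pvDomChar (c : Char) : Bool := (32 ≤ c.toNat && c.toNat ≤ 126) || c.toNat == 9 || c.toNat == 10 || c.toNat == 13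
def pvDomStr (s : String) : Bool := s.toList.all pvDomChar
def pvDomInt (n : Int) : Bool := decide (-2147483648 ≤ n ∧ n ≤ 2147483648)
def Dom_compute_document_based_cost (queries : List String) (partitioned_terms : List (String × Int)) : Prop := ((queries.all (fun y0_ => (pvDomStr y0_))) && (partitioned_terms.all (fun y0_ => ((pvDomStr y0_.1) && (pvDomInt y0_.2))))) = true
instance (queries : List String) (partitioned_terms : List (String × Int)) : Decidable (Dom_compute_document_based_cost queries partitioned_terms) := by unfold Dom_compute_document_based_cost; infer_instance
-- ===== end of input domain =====

-- B replaces the per-occurrence accumulation over each query with one aggregated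
-- frequency table of all terms and a single pass over the distinct terms (alternative decomposition).


-- ===== PORT A =====
-- Literal port: for each query, split and add the cost of each occurrence that is a key.
def compute_document_based_cost (queries : List String) (partitioned_terms : List (String × Int)) : Int :=
  queries.foldl (fun costs query =>
    let query_terms := PySem.Str.split₀ query
    let query_cost := query_terms.foldl (fun qc term =>
      if (PySem.Dict.mk partitioned_terms).contains term then
        qc + (PySem.Dict.mk partitioned_terms).getD term 0
      else qc) 0
    costs + query_cost) 0

-- ===== PORT B =====
-- Port of Source B: build one frequency dict of all terms, then one pass over distinct terms.
def compute_document_based_cost_alt (queries : List String) (partitioned_terms : List (String × Int)) : Int :=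
  let freq : PySem.Dict String Int :=
    queries.foldl (fun d query =>
      (PySem.Str.split₀ query).foldl (fun d term => d.insert term (d.getD term 0 + 1)) d)
      PySem.Dict.empty
  freq.items.foldl (fun total p =>
    if (PySem.Dict.mk partitioned_terms).contains p.1 then
      total + p.2 * (PySem.Dict.mk partitioned_terms).getD p.1 0
    else total) 0

-- ===== PRECONDITION & SPEC =====
def Spec_compute_document_based_cost (queries : List String) (partitioned_terms : List (String × Int)) (out : Int) : Prop := out = compute_document_based_cost_alt queries partitioned_terms
instance (queries : List String) (partitioned_terms : List (String × Int)) (out : Int) : Decidable (Spec_compute_document_based_cost queries partitioned_terms out) := by unfold Spec_compute_document_based_cost; infer_instance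

-- ===== CLAIM (what is proved, stated in full; the proofs are below) =====
def Claim_equal_compute_document_based_cost : Prop := ∀ (queries : List String) (partitioned_terms : List (String × Int)), Dom_compute_document_based_cost queries partitioned_terms → Spec_compute_document_based_cost queries partitioned_terms (compute_document_based_cost queries partitioned_terms)

-- ===== LEMMAS AND PROOFS =====

-- A nested fold over the split pieces is a fold over the flattened term list.
theorem pv_foldl_nested {α β γ : Type} (g : α → List β) (step : γ → β → γ) :
    ∀ (l : List α) (init : γ),
      l.foldl (fun acc x => (g x).foldl step acc) init = (l.flatMap g).foldl step init
  | [], _ => rfl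
  | x :: t, init => by
      simp only [List.foldl_cons, List.flatMap_cons, List.foldl_append]
      exact pv_foldl_nested g step t _

-- Summing g over a list equals summing count * g over its distinct elements.
theorem pv_sum_count (L : List String) (g : String → Int) :
    (L.map g).sum = ((PySem.Set.ofList L).map (fun k => (L.count k : Int) * g k)).sum := by
  rw [Finset.sum_list_map_count L g,
      ← List.sum_toFinset (fun k => (L.count k : Int) * g k) (PySem.Set.nodup_ofList L)]
  have htf : (PySem.Set.ofList L : List String).toFinset = L.toFinset := by
    apply Finset.ext
    intro a
    simp [List.mem_toFinset, PySem.Set.mem_ofList]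
  rw [htf]
  refine Finset.sum_congr rfl ?_
  intro m _
  simp

theorem compute_document_based_cost_eq (queries : List String)
    (partitioned_terms : List (String × Int)) :
    compute_document_based_cost queries partitioned_terms
      = compute_document_based_cost_alt queries partitioned_terms := by
  unfold compute_document_based_cost compute_document_based_cost_alt
  set pd := PySem.Dict.mk partitioned_terms with hpd
  set g : String → Int := fun t => if pd.contains t then pd.getD t 0 else 0 with hg
  set L : List String := queries.flatMap PySem.Str.split₀ with hL
  -- A side: sum of g over all occurrences
  have hA : queries.foldl (fun costs query =>
      let query_terms := PySem.Str.split₀ query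
      let query_cost := query_terms.foldl (fun qc term =>
        if pd.contains term then qc + pd.getD term 0 else qc) 0
      costs + query_cost) 0 = (L.map g).sum := by
    have hinner : ∀ (q : String),
        (PySem.Str.split₀ q).foldl (fun qc term =>
          if pd.contains term then qc + pd.getD term 0 else qc) 0
          = (((PySem.Str.split₀ q)).map g).sum := by
      intro q
      have : (fun (qc : Int) (term : String) =>
          if pd.contains term then qc + pd.getD term 0 else qc)
          = (fun qc term => qc + g term) := by
        funext qc term
        simp only [hg]
        split <;> simp
      rw [this, PySem.List.foldl_add]
      simp
    simp only [hinner]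
    rw [PySem.List.foldl_add]
    simp only [hL, List.flatMap_def, List.map_flatten, List.sum_flatten, List.map_map,
      Function.comp_def, zero_add]
  -- B side: the frequency dict is the counter of L
  have hfreq : queries.foldl (fun d query =>
      (PySem.Str.split₀ query).foldl (fun d term => d.insert term (d.getD term 0 + 1)) d)
      PySem.Dict.empty = PySem.Dict.counter L := by
    rw [pv_foldl_nested, ← hL, PySem.Dict.foldl_insert_getD_add_one_eq_counter]
  have hB : (PySem.Dict.counter L).items.foldl (fun total p =>
      if pd.contains p.1 then total + p.2 * pd.getD p.1 0 else total) 0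
      = ((PySem.Set.ofList L).map (fun k => (L.count k : Int) * g k)).sum := by
    rw [PySem.Dict.items_counter]
    have : (fun (total : Int) (p : String × Int) =>
        if pd.contains p.1 then total + p.2 * pd.getD p.1 0 else total)
        = (fun total p => total + (if pd.contains p.1 then p.2 * pd.getD p.1 0 else 0)) := by
      funext total p
      split <;> simp
    rw [this, List.foldl_map, PySem.List.foldl_add (g := fun k =>
      if pd.contains k then (L.count k : Int) * pd.getD k 0 else 0)]
    simp only [hg, mul_ite, mul_zero, zero_add]
  simp only [hA, hfreq, hB, pv_sum_count L g]

-- ===== VERDICT (by name: the statement is the Claim_ definition above) =====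
theorem compute_document_based_cost_spec : Claim_equal_compute_document_based_cost := by
  intro queries partitioned_terms _
  unfold Spec_compute_document_based_cost
  exact compute_document_based_cost_eq queries partitioned_terms
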